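-- pv_equiv track=rewrite | github.com/jerryname2022/CosyVoice | ImagemagickTest.py | same_text2
-- ===== SOURCE A (Python) =====
-- def same_text2(text0, text1):
--     result = []
--     flag = -1
--
--     for i in range(len(text0)):
--         char0 = text0[i]
--
--         for j in range(len(text1)):
--             char1 = text1[j]
--
--             if j > flag and char0 == char1:
--                 flag = j
--                 result.append((i, j))
--                 break
--
--     return result
-- ===== SOURCE B (Python) =====
-- def same_text2(text0, text1):
--     result = []
--     rest = text1
--     offset = 0
--     for i, ch in enumerate(text0):
--         k = rest.find(ch)
--         if k != -1:
--             result.append((i, offset + k))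
--             rest = rest[k + 1:]
--             offset += k + 1
--     return result
-- ===== Notes on version B (the rewrite author's own statement) =====
-- stated objective: faster
-- what changed: B keeps the still-unmatched suffix of text1 (rest, offset) and does one str.find on it per character of text0, instead of A's character-by-character rescan of all of text1 under a 'j > flag' guard.
import Mathlib
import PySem

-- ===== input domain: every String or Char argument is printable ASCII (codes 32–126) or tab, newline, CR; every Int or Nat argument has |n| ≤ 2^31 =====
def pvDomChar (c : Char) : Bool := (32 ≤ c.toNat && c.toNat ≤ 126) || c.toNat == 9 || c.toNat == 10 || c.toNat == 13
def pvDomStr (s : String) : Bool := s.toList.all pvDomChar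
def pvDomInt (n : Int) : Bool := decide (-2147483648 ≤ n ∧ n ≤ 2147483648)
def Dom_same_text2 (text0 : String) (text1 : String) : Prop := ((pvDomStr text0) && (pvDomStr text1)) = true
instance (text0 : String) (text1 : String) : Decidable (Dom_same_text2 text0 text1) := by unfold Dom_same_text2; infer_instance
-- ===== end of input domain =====

-- B replaces A's flag-guarded rescans of all of text1 with str.find on a shrinking suffix of text1 (alternative state machine, same results).

-- ===== PORT A =====
-- inner 'for j in range(len(text1)) … break': first j with j > flag and text0[i] == text1[j]
def aInner (char0 : Char) (flag : Int) : List (Int × Char) → Option Int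
  | [] => none
  | (j, char1) :: rest => if flag < j && char0 == char1 then some j else aInner char0 flag rest

-- outer 'for i in range(len(text0))' with state (flag, result)
def aOuter (t1 : List (Int × Char)) : List (Int × Char) → Int → List (Int × Int) → List (Int × Int)
  | [], _, result => result
  | (i, char0) :: rest, flag, result =>
    match aInner char0 flag t1 with
    | some j => aOuter t1 rest j (result ++ [(i, j)])
    | none => aOuter t1 rest flag result

def same_text2 (text0 : String) (text1 : String) : List (Int × Int) :=
  aOuter (PySem.List.enumerate text1.toList) (PySem.List.enumerate text0.toList) (-1) []

-- ===== PORT B =====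
-- 'for i, ch in enumerate(text0)' with state (rest, offset, result); 'rest.find(ch)' is PySem.Chars.find, 'rest[k+1:]' is slice
def bLoop : List (Int × Char) → List Char → Int → List (Int × Int) → List (Int × Int)
  | [], _, _, result => result
  | (i, ch) :: tl, rest, offset, result =>
    let k := PySem.Chars.find rest [ch]
    if k ≠ -1 then
      bLoop tl (PySem.List.slice rest (some (k + 1)) none) (offset + (k + 1)) (result ++ [(i, offset + k)])
    else
      bLoop tl rest offset result

def same_text2_alt (text0 : String) (text1 : String) : List (Int × Int) :=
  bLoop (PySem.List.enumerate text0.toList) text1.toList 0 []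

-- ===== PRECONDITION & SPEC =====
def Spec_same_text2 (text0 : String) (text1 : String) (out : List (Int × Int)) : Prop := out = same_text2_alt text0 text1
instance (text0 : String) (text1 : String) (out : List (Int × Int)) : Decidable (Spec_same_text2 text0 text1 out) := by unfold Spec_same_text2; infer_instance

-- ===== CLAIM (what is proved, stated in full; the proofs are below) =====
def Claim_equal_same_text2 : Prop := ∀ (text0 : String) (text1 : String), Dom_same_text2 text0 text1 → Spec_same_text2 text0 text1 (same_text2 text0 text1)

-- ===== LEMMAS AND PROOFS =====

-- proof-side characterization of the first index of a character
def firstIdx (c : Char) : List Char → Option Nat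
  | [] => none
  | x :: xs => if x = c then some 0 else (firstIdx c xs).map (· + 1)

theorem firstIdx_none {c : Char} {l : List Char} (h : firstIdx c l = none) : c ∉ l := by
  induction l with
  | nil => simp
  | cons x xs ih =>
    simp only [firstIdx] at h
    split at h
    · exact absurd h (by simp)
    · rcases Option.map_eq_none_iff.mp h with h'
      intro hm
      rcases List.mem_cons.mp hm with h1 | h2
      · exact ‹¬ x = c› h1.symm
      · exact ih h' h2

theorem firstIdx_some {c : Char} {l : List Char} {k : Nat} (h : firstIdx c l = some k) :
    l[k]? = some c ∧ ∀ i < k, l[i]? ≠ some c := by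
  induction l generalizing k with
  | nil => simp [firstIdx] at h
  | cons x xs ih =>
    simp only [firstIdx] at h
    split at h
    · cases h; subst ‹x = c›; simp
    · rcases Option.map_eq_some_iff.mp h with ⟨k', hk', rfl⟩
      obtain ⟨h1, h2⟩ := ih hk'
      refine ⟨by simpa using h1, ?_⟩
      intro i hi
      cases i with
      | zero => simpa using fun hc => ‹¬ x = c› hc
      | succ i' => simpa using h2 i' (by omega)

theorem singleton_infix {c : Char} {l : List Char} : [c] <:+: l ↔ c ∈ l := by
  constructor
  · intro h; exact (List.singleton_sublist).mp h.sublist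
  · intro h
    rcases List.append_of_mem h with ⟨s, t, rfl⟩
    exact ⟨s, t, by simp⟩

theorem singleton_prefix {c : Char} {t : List Char} : [c] <+: t ↔ t.head? = some c := by
  cases t with
  | nil => simp
  | cons x xs =>
    constructor
    · intro h
      rcases h with ⟨u, hu⟩
      cases hu; rfl
    · intro h
      simp only [List.head?_cons, Option.some.injEq] at h
      exact ⟨xs, by simp [h]⟩

theorem prefix_drop_iff {c : Char} {l : List Char} {j : Nat} : [c] <+: l.drop j ↔ l[j]? = some c := by
  rw [singleton_prefix, List.head?_drop]

-- str.find for a single-character needle computes the first index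
theorem find_single (c : Char) (l : List Char) :
    PySem.Chars.find l [c] = (firstIdx c l).elim (-1) (fun k => (k : Int)) := by
  cases h : firstIdx c l with
  | none =>
    have hm : c ∉ l := firstIdx_none h
    have : ¬ [c] <:+: l := fun hi => hm (singleton_infix.mp hi)
    simp [(PySem.Chars.find_eq_neg_one_iff l [c]).mpr this]
  | some k =>
    obtain ⟨h1, h2⟩ := firstIdx_some h
    have hmem : c ∈ l := List.mem_of_getElem? h1
    have hnn : 0 ≤ PySem.Chars.find l [c] :=
      (PySem.Chars.find_nonneg_iff l [c]).mpr (singleton_infix.mpr hmem)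
    obtain ⟨hp, hmin⟩ := PySem.Chars.find_spec (s := l) (sub := [c]) hnn
    have hfk : (PySem.Chars.find l [c]).toNat = k := by
      rcases lt_trichotomy (PySem.Chars.find l [c]).toNat k with hlt | heq | hgt
      · exact absurd (prefix_drop_iff.mp hp) (h2 _ hlt)
      · exact heq
      · exact absurd (prefix_drop_iff.mpr h1) (hmin k hgt)
    have := Int.toNat_of_nonneg hnn
    simp only [Option.elim]
    omega

-- skipping the first d pairs of the enumeration when their indices are all ≤ flag
theorem aInner_skip (c : Char) : ∀ (d : Nat) (l : List Char) (s flag : Int), s + d ≤ flag + 1 →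
    aInner c flag (PySem.List.enumerate l s) = aInner c flag (PySem.List.enumerate (l.drop d) (s + d)) := by
  intro d
  induction d with
  | zero => intro l s flag _; simp
  | succ d' ih =>
    intro l s flag hle
    cases l with
    | nil => simp
    | cons x xs =>
      rw [PySem.List.enumerate_cons, aInner]
      have hns : ¬ flag < s := by omega
      simp only [hns, decide_false, Bool.false_and]
      rw [ih xs (s + 1) flag (by omega)]
      have : s + 1 + (d' : Int) = s + ((d' : Int) + 1) := by ring
      simp [this]

-- once every remaining index exceeds flag, A's inner scan is a plain first-match search
theorem aInner_pass (c : Char) : ∀ (l : List Char) (s flag : Int), flag < s →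
    aInner c flag (PySem.List.enumerate l s) = (firstIdx c l).map (fun k => s + k) := by
  intro l
  induction l with
  | nil => intro s flag _; simp [aInner, firstIdx]
  | cons x xs ih =>
    intro s flag hlt
    rw [PySem.List.enumerate_cons, aInner, firstIdx]
    have : (flag < s) = True := by simp [hlt]
    by_cases hc : x = c
    · subst hc
      simp [hlt]
    · have hb : (c == x) = false := by simpa using (Ne.symm hc)
      simp only [hlt, decide_true, hb, Bool.and_false, Bool.false_eq_true,
        if_false, if_neg hc]
      rw [ih (s + 1) flag (by omega)]
      cases firstIdx c xs with
      | none => simp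
      | some k => simp; ring

theorem aInner_drop (t1 : List Char) (c : Char) (flag : Int) (f : Nat) (hf : (f : Int) = flag + 1) :
    aInner c flag (PySem.List.enumerate t1) = (firstIdx c (t1.drop f)).map (fun k => ((f : Int) + k)) := by
  have h1 := aInner_skip c f t1 0 flag (by omega)
  simp only [zero_add] at h1
  rw [show PySem.List.enumerate t1 = PySem.List.enumerate t1 0 from rfl, h1,
    aInner_pass c (t1.drop f) (f : Int) flag (by omega)]

-- main loop invariant: rest is the suffix of text1 after the last match, offset its start
theorem loop_eq (t1 : List Char) :
    ∀ (l0 : List (Int × Char)) (f : Nat) (flag : Int), (f : Int) = flag + 1 →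
    ∀ (result : List (Int × Int)),
      bLoop l0 (t1.drop f) (f : Int) result = aOuter (PySem.List.enumerate t1) l0 flag result := by
  intro l0
  induction l0 with
  | nil => intro f flag _ result; rfl
  | cons ic tl ih =>
    intro f flag hf result
    obtain ⟨i, c⟩ := ic
    rw [bLoop, aOuter, aInner_drop t1 c flag f hf]
    cases hfi : firstIdx c (t1.drop f) with
    | none =>
      simp only [find_single, hfi, Option.elim]
      simp [ih f flag hf result]
    | some k =>
      simp only [find_single, hfi, Option.elim, Option.pure_def]
      have hne : ((k : Int) ≠ -1) := by omega
      rw [if_pos hne]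
      have hcast : (k : Int) + 1 = ((k + 1 : Nat) : Int) := by push_cast; ring
      rw [hcast, PySem.List.slice_from_natCast, List.drop_drop]
      have hf' : ((f + (k + 1) : Nat) : Int) = ((f : Int) + k) + 1 := by push_cast; ring
      have := ih (f + (k + 1)) ((f : Int) + k) hf' (result ++ [(i, (f : Int) + k)])
      rw [show (f : Int) + ((k + 1 : Nat) : Int) = ((f + (k + 1) : Nat) : Int) by push_cast; ring]
      exact this

-- ===== VERDICT (by name: the statement is the Claim_ definition above) =====
theorem same_text2_spec : Claim_equal_same_text2 := by
  intro text0 text1 _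
  unfold Spec_same_text2 same_text2 same_text2_alt
  have := loop_eq text1.toList (PySem.List.enumerate text0.toList) 0 (-1) (by norm_num) []
  simpa using this.symm
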